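-- pv_equiv track=rewrite | github.com/Matheus-Cougias/Otimizacao_Roteamento_de_Veiculos | Códigos/Parte 2.2.py | Melhoria
-- ===== SOURCE A (Python) =====
-- def Calcula_Clientes_Atendidos(solucao, custoCliente, janelas):
--     total = 0
--     for i in range(0, len(solucao)-1):
--         if custoCliente[i] <= janelas[solucao[i]][1]:
--             if custoCliente[i] >= janelas[solucao[i]][0]:
--                 total += 1
--     return total
--
-- def Calcula_Custos(solucao, distancias, atendimento):
--     custoTotal = atendimento[0]
--     custoCliente = [0]
--     for i in range(0, len(solucao)-1):
--         custoTotal += distancias[solucao[i]][solucao[i+1]]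
--         custoCliente.append(custoTotal)
--         custoTotal += atendimento[solucao[i]]
--     i = solucao[-1]
--     j = solucao[0]
--     custoTotal += distancias[i][j]
--     return custoTotal, custoCliente
--
-- def Melhoria(solucaoInicial, custoInicial, custoClientes, janelas, distancias, atendimento):
--     melhorSolucao = solucaoInicial
--     melhorCusto = custoInicial
--     melhorCustoClientes = custoClientes
--     melhorTotal = Calcula_Clientes_Atendidos(melhorSolucao, melhorCustoClientes, janelas)
--     for i in range(1, len(solucaoInicial)-2):
--         for j in range(1, len(solucaoInicial)-2):
--             if j > i:
--                 solucaoAtual = solucaoInicial.copy()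
--                 auxi = solucaoAtual[i]
--                 auxj = solucaoAtual[j]
--                 solucaoAtual[i] = auxj
--                 solucaoAtual[j] = auxi
--                 custoSolucaoAtual, custoClienteAtual = Calcula_Custos(solucaoAtual, distancias, atendimento)
--                 clientesAtendidosAtual = Calcula_Clientes_Atendidos(solucaoAtual, custoClienteAtual, janelas)
--                 if clientesAtendidosAtual > melhorTotal:
--                     melhorSolucao = solucaoAtual
--                     melhorCusto = custoSolucaoAtual
--                     melhorCustoClientes = custoClienteAtual
--                     melhorTotal = clientesAtendidosAtual
--                 elif clientesAtendidosAtual == melhorTotal: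
--                     if custoSolucaoAtual < melhorCusto:
--                         melhorSolucao = solucaoAtual
--                         melhorCusto = custoSolucaoAtual
--                         melhorCustoClientes = custoClienteAtual
--                         melhorTotal = clientesAtendidosAtual
--     return melhorSolucao, melhorCustoClientes, melhorCusto
-- ===== SOURCE B (Python) =====
-- def Calcula_Clientes_Atendidos(solucao, custoCliente, janelas):
--     total = 0
--     for i in range(0, len(solucao)-1):
--         if custoCliente[i] <= janelas[solucao[i]][1]:
--             if custoCliente[i] >= janelas[solucao[i]][0]:
--                 total += 1
--     return total
--
-- def Calcula_Custos(solucao, distancias, atendimento):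
--     custoTotal = atendimento[0]
--     custoCliente = [0]
--     for i in range(0, len(solucao)-1):
--         custoTotal += distancias[solucao[i]][solucao[i+1]]
--         custoCliente.append(custoTotal)
--         custoTotal += atendimento[solucao[i]]
--     custoTotal += distancias[solucao[-1]][solucao[0]]
--     return custoTotal, custoCliente
--
-- def Melhoria(solucaoInicial, custoInicial, custoClientes, janelas, distancias, atendimento):
--     # Streaming two-pass selection instead of a greedy lexicographic accumulator:
--     # pass 1 reduces the candidate stream to one scalar (the best achievable number
--     # of served clients); pass 2 re-streams the candidates and keeps the first
--     # minimal-cost candidate achieving that target.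
--     n = len(solucaoInicial)
--
--     def candidatos():
--         yield solucaoInicial, custoInicial, custoClientes
--         for i in range(1, n - 2):
--             for j in range(i + 1, n - 2):
--                 s = solucaoInicial.copy()
--                 s[i], s[j] = s[j], s[i]
--                 custo, cc = Calcula_Custos(s, distancias, atendimento)
--                 yield s, custo, cc
--
--     alvo = max(Calcula_Clientes_Atendidos(s, cc, janelas) for s, _, cc in candidatos())
--     melhor = None
--     for s, custo, cc in candidatos():
--         if Calcula_Clientes_Atendidos(s, cc, janelas) == alvo and (melhor is None or custo < melhor[1]):
--             melhor = (s, custo, cc)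
--     return melhor[0], melhor[2], melhor[1]
-- ===== Notes on version B (the rewrite author's own statement) =====
-- stated objective: alternative
-- what changed: A's single greedy pass updating a four-variable lexicographic best-so-far accumulator is replaced by a streaming two-pass selection: pass 1 reduces the candidate stream to one scalar (the maximum achievable number of served clients), pass 2 re-streams the candidates and keeps the first minimal-cost candidate achieving that target in an Option accumulator; no lexicographic comparison and no stored candidate list.
import Mathlib
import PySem

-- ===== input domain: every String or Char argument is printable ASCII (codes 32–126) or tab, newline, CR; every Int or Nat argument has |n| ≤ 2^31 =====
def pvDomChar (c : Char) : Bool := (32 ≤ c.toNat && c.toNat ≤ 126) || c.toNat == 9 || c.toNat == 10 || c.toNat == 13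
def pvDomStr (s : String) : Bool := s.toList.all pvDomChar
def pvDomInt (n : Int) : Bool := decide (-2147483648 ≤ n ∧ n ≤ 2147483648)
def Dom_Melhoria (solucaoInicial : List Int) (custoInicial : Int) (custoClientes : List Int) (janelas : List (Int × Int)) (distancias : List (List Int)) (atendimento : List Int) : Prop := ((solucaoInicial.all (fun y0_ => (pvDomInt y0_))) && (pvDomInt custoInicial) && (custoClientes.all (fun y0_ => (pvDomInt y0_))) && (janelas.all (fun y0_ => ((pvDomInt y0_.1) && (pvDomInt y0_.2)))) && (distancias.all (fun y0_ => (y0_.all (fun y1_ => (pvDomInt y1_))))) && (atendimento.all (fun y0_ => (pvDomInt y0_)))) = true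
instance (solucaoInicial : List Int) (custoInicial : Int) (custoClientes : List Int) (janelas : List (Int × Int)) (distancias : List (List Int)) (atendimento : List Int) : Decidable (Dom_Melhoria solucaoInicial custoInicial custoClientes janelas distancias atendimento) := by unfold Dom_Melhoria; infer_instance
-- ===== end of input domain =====

-- B replaces A's single greedy pass (a four-variable lexicographic best-so-far accumulator) by a
-- streaming two-pass selection: pass 1 reduces the candidate stream to one scalar (the maximum
-- achievable number of served clients), pass 2 re-streams the candidates and keeps the first
-- minimal-cost candidate achieving that target in an Option accumulator. Objective: alternative
-- decomposition; same asymptotic cost.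

-- ===== PORT A =====
-- shared module helper: Calcula_Clientes_Atendidos (literal; indices are in range under Pre_, so pyGetD is exact)
def CalculaClientesAtendidos (solucao : List Int) (custoCliente : List Int) (janelas : List (Int × Int)) : Int :=
  (PySem.List.pyRange 0 ((solucao.length : Int) - 1)).foldl (fun total i =>
    if PySem.List.pyGetD custoCliente i 0 ≤
        (PySem.List.pyGetD janelas (PySem.List.pyGetD solucao i 0) (0, 0)).2 then
      if PySem.List.pyGetD custoCliente i 0 ≥
          (PySem.List.pyGetD janelas (PySem.List.pyGetD solucao i 0) (0, 0)).1 then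
        total + 1
      else total
    else total) 0

-- shared module helper: Calcula_Custos (literal; indices are in range under Pre_, so pyGetD is exact)
def CalculaCustos (solucao : List Int) (distancias : List (List Int)) (atendimento : List Int) : Int × List Int :=
  let acc := (PySem.List.pyRange 0 ((solucao.length : Int) - 1)).foldl
    (fun (acc : Int × List Int) i =>
      let ct := acc.1 + PySem.List.pyGetD
        (PySem.List.pyGetD distancias (PySem.List.pyGetD solucao i 0) [])
        (PySem.List.pyGetD solucao (i + 1) 0) 0
      (ct + PySem.List.pyGetD atendimento (PySem.List.pyGetD solucao i 0) 0, acc.2 ++ [ct]))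
    (PySem.List.pyGetD atendimento 0 0, [(0 : Int)])
  (acc.1 + PySem.List.pyGetD
      (PySem.List.pyGetD distancias (PySem.List.pyGetD solucao (-1) 0) [])
      (PySem.List.pyGetD solucao 0 0) 0,
    acc.2)

-- the two-assignment swap `s[i], s[j] = original values swapped` (both Pythons share this line;
-- pySetD/pyGetD are exact because 1 ≤ i, j under the loop ranges)
def pvSwap (l : List Int) (i j : Int) : List Int :=
  PySem.List.pySetD (PySem.List.pySetD l i (PySem.List.pyGetD l j 0)) j (PySem.List.pyGetD l i 0)

def Melhoria (solucaoInicial : List Int) (custoInicial : Int) (custoClientes : List Int) (janelas : List (Int × Int)) (distancias : List (List Int)) (atendimento : List Int) : List Int × List Int × Int :=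
  let n : Int := solucaoInicial.length
  let st0 : List Int × Int × List Int × Int :=
    (solucaoInicial, custoInicial, custoClientes,
      CalculaClientesAtendidos solucaoInicial custoClientes janelas)
  let st := (PySem.List.pyRange 1 (n - 2)).foldl (fun st i =>
    (PySem.List.pyRange 1 (n - 2)).foldl (fun st j =>
      if j > i then
        let sa := pvSwap solucaoInicial i j
        let cs := CalculaCustos sa distancias atendimento
        let ca := CalculaClientesAtendidos sa cs.2 janelas
        if ca > st.2.2.2 then (sa, cs.1, cs.2, ca)
        else if ca = st.2.2.2 then
          if cs.1 < st.2.1 then (sa, cs.1, cs.2, ca) else st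
        else st
      else st) st) st0
  (st.1, st.2.2.1, st.2.1)

-- ===== PORT B =====
-- the served-clients count of a candidate (solution, cost, custoCliente)
def pvServed (c : List Int × Int × List Int) (janelas : List (Int × Int)) : Int :=
  CalculaClientesAtendidos c.1 c.2.2 janelas

-- one swapped candidate of the stream `candidatos()`
def pvCand (solucaoInicial : List Int) (distancias : List (List Int)) (atendimento : List Int) (i j : Int) : List Int × Int × List Int :=
  let s := pvSwap solucaoInicial i j
  let cs := CalculaCustos s distancias atendimento
  (s, cs.1, cs.2)

-- the swapped part of the candidate stream, in yield order
def pvRest (solucaoInicial : List Int) (distancias : List (List Int)) (atendimento : List Int) : List (List Int × Int × List Int) :=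
  (PySem.List.pyRange 1 ((solucaoInicial.length : Int) - 2)).flatMap (fun i =>
    (PySem.List.pyRange (i + 1) ((solucaoInicial.length : Int) - 2)).map
      (pvCand solucaoInicial distancias atendimento i))

-- pass 2 step: `if served == alvo and (melhor is None or custo < melhor[1]): melhor = ...`
def pvPass2 (alvo : Int) (janelas : List (Int × Int)) (b : Option (List Int × Int × List Int)) (c : List Int × Int × List Int) : Option (List Int × Int × List Int) :=
  match b with
  | none => if pvServed c janelas = alvo then some c else none
  | some x => if pvServed c janelas = alvo ∧ c.2.1 < x.2.1 then some c else some x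

def Melhoria_alt (solucaoInicial : List Int) (custoInicial : Int) (custoClientes : List Int) (janelas : List (Int × Int)) (distancias : List (List Int)) (atendimento : List Int) : List Int × List Int × Int :=
  let c0 : List Int × Int × List Int := (solucaoInicial, custoInicial, custoClientes)
  let rest := pvRest solucaoInicial distancias atendimento
  -- pass 1: max over the stream (first element c0 is the initial value of the max)
  let alvo := rest.foldl (fun m c => max m (pvServed c janelas)) (pvServed c0 janelas)
  -- pass 2: first minimal-cost candidate serving `alvo` clients
  let melhor := (c0 :: rest).foldl (pvPass2 alvo janelas) none
  match melhor with
  | some b => (b.1, b.2.2, b.2.1)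
  | none => (solucaoInicial, custoClientes, custoInicial)  -- unreachable: c0 or a better one serves `alvo`

-- ===== PRECONDITION & SPEC =====
-- Pre_: exactly the shape conditions under which Python A raises no IndexError: the initial
-- custoClientes is long enough, every client index read through janelas/atendimento (all but the
-- last element, Python-wraparound allowed) and through distancias (all elements, rows and columns)
-- is in range; the distancias/atendimento conditions are only needed once a swap happens (n ≥ 5).
-- Bool helpers so that Pre_ decides fast: pvInB n e ↔ PySem.Raise.InRange n e (Python index in range)
def pvInB (n e : Int) : Bool := decide (-n ≤ e) && decide (e < n)
def pvAllIn (l : List Int) (n : Int) : Bool := l.all (pvInB n)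
def Pre_Melhoria (solucaoInicial : List Int) (custoInicial : Int) (custoClientes : List Int) (janelas : List (Int × Int)) (distancias : List (List Int)) (atendimento : List Int) : Prop :=
  (decide ((solucaoInicial.length : Int) ≤ (custoClientes.length : Int) + 1) &&
   pvAllIn solucaoInicial.dropLast (janelas.length : Int) &&
   (decide (solucaoInicial.length < 5) ||
    (!(atendimento.isEmpty) &&
     pvAllIn solucaoInicial (distancias.length : Int) &&
     pvAllIn solucaoInicial.dropLast (atendimento.length : Int) &&
     solucaoInicial.all (fun a =>
       pvAllIn solucaoInicial ((PySem.List.pyGetD distancias a []).length : Int))))) = true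
instance (solucaoInicial : List Int) (custoInicial : Int) (custoClientes : List Int) (janelas : List (Int × Int)) (distancias : List (List Int)) (atendimento : List Int) : Decidable (Pre_Melhoria solucaoInicial custoInicial custoClientes janelas distancias atendimento) := by unfold Pre_Melhoria; infer_instance

def pvWitness_Melhoria : List Int × Int × List Int × (List (Int × Int)) × List (List Int) × List Int :=
  ([0, 1, 2, 3, 0], 7, [0, 1, 2, 3, 4],
    [(0, 3), (0, 3), (0, 3), (0, 3)],
    [[0, 1, 2, 3], [1, 0, 1, 2], [2, 1, 0, 1], [3, 2, 1, 0]],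
    [1, 1, 1, 1])

def Spec_Melhoria (solucaoInicial : List Int) (custoInicial : Int) (custoClientes : List Int) (janelas : List (Int × Int)) (distancias : List (List Int)) (atendimento : List Int) (out : List Int × List Int × Int) : Prop := out = Melhoria_alt solucaoInicial custoInicial custoClientes janelas distancias atendimento
instance (solucaoInicial : List Int) (custoInicial : Int) (custoClientes : List Int) (janelas : List (Int × Int)) (distancias : List (List Int)) (atendimento : List Int) (out : List Int × List Int × Int) : Decidable (Spec_Melhoria solucaoInicial custoInicial custoClientes janelas distancias atendimento out) := by unfold Spec_Melhoria; infer_instance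

-- ===== CLAIM (what is proved, stated in full; the proofs are below) =====
def Claim_equal_Melhoria : Prop := ∀ (solucaoInicial : List Int) (custoInicial : Int) (custoClientes : List Int) (janelas : List (Int × Int)) (distancias : List (List Int)) (atendimento : List Int), Dom_Melhoria solucaoInicial custoInicial custoClientes janelas distancias atendimento → Pre_Melhoria solucaoInicial custoInicial custoClientes janelas distancias atendimento → Spec_Melhoria solucaoInicial custoInicial custoClientes janelas distancias atendimento (Melhoria solucaoInicial custoInicial custoClientes janelas distancias atendimento)

-- ===== LEMMAS AND PROOFS =====

-- A's greedy step on its quadruple state, abstracted over the candidate triple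
def pvQStep (janelas : List (Int × Int)) (st : List Int × Int × List Int × Int) (c : List Int × Int × List Int) : List Int × Int × List Int × Int :=
  if pvServed c janelas > st.2.2.2 then (c.1, c.2.1, c.2.2, pvServed c janelas)
  else if pvServed c janelas = st.2.2.2 then
    if c.2.1 < st.2.1 then (c.1, c.2.1, c.2.2, pvServed c janelas) else st
  else st

-- A's greedy step on candidate triples (the quadruple's 4th component is determined)
def pvStepT (janelas : List (Int × Int)) (st c : List Int × Int × List Int) : List Int × Int × List Int :=
  if pvServed c janelas > pvServed st janelas then c
  else if pvServed c janelas = pvServed st janelas ∧ c.2.1 < st.2.1 then c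
  else st

def pvExt (c : List Int × Int × List Int) (janelas : List (Int × Int)) : List Int × Int × List Int × Int :=
  (c.1, c.2.1, c.2.2, pvServed c janelas)

-- folding a body guarded by `j > i` over range(1, m) is folding the body over range(i+1, m)
theorem pvFoldl_guard {σ : Type} (f : σ → Int → σ) (i m : Int) (hi : 1 ≤ i) (st : σ) :
    (PySem.List.pyRange 1 m).foldl (fun st j => if j > i then f st j else st) st
    = (PySem.List.pyRange (i + 1) m).foldl f st := by
  have hskip : ∀ (l : List Int), (∀ x ∈ l, ¬ x > i) → ∀ (s : σ),
      l.foldl (fun st j => if j > i then f st j else st) s = s := by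
    intro l hl
    induction l with
    | nil => intro s; rfl
    | cons x xs ih =>
      intro s
      have hx : ¬ x > i := hl x (by simp)
      simp only [List.foldl_cons, if_neg hx]
      exact ih (fun y hy => hl y (by simp [hy])) s
  by_cases h : i + 1 ≤ m
  · rw [PySem.List.pyRange_one_append 1 (i + 1) m (by omega) h, List.foldl_append]
    have hinner := hskip (PySem.List.pyRange 1 (i + 1)) (fun x hx => by
      have := (PySem.List.mem_pyRange_one).mp hx; omega) st
    rw [hinner]
    exact PySem.List.foldl_congr_mem _ _ _ _ (fun acc x hx => by
      have := (PySem.List.mem_pyRange_one).mp hx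
      rw [if_pos (by omega)])
  · rw [PySem.List.pyRange_one_eq_nil (by omega : m ≤ i + 1)]
    simp only [List.foldl_nil]
    exact hskip _ (fun x hx => by
      have := (PySem.List.mem_pyRange_one).mp hx; omega) st

-- A's nested guarded fold is the flat greedy fold over the candidate stream (minus c0)
theorem pvA_norm (sol : List Int) (ci : Int) (cc : List Int) (jan : List (Int × Int)) (dist : List (List Int)) (at_ : List Int) :
    Melhoria sol ci cc jan dist at_
    = ((fun g => (g.1, g.2.2.1, g.2.1))
        ((pvRest sol dist at_).foldl (pvQStep jan) (pvExt (sol, ci, cc) jan))) := by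
  unfold Melhoria pvRest pvExt
  simp only [List.foldl_flatMap, List.foldl_map, pvServed]
  refine congrArg (fun g : List Int × Int × List Int × Int => (g.1, g.2.2.1, g.2.1)) ?_
  refine PySem.List.foldl_congr_mem _ _ _ _ (fun st i hi => ?_)
  rw [pvFoldl_guard _ i _ ((PySem.List.mem_pyRange_one).mp hi).1]
  refine PySem.List.foldl_congr_mem _ _ _ _ (fun acc j _ => ?_)
  rfl

-- the quadruple fold is the triple fold with the served count carried along
theorem pvQfold_ext (jan : List (Int × Int)) : ∀ (l : List (List Int × Int × List Int)) (st : List Int × Int × List Int),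
    l.foldl (pvQStep jan) (pvExt st jan) = pvExt (l.foldl (pvStepT jan) st) jan := by
  intro l
  induction l with
  | nil => intro st; rfl
  | cons c rest ih =>
    intro st
    have hstep : pvQStep jan (pvExt st jan) c = pvExt (pvStepT jan st c) jan := by
      unfold pvQStep pvStepT pvExt
      rcases st with ⟨s1, s2, s3⟩
      split_ifs with h1 h2 h3 h4 <;> simp_all
    simp only [List.foldl_cons, hstep, ih]

-- the served count of the greedy result is the running max of pass 1
theorem pvMaxlem (jan : List (Int × Int)) : ∀ (l : List (List Int × Int × List Int)) (st : List Int × Int × List Int),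
    pvServed (l.foldl (pvStepT jan) st) jan
    = l.foldl (fun m c => max m (pvServed c jan)) (pvServed st jan) := by
  intro l
  induction l with
  | nil => intro st; rfl
  | cons c rest ih =>
    intro st
    have hstep : pvServed (pvStepT jan st c) jan = max (pvServed st jan) (pvServed c jan) := by
      unfold pvStepT
      split_ifs with h1 h2 <;> omega
    simp only [List.foldl_cons, ih, hstep]

theorem pvMax_init_le (jan : List (Int × Int)) : ∀ (l : List (List Int × Int × List Int)) (a : Int),
    a ≤ l.foldl (fun m c => max m (pvServed c jan)) a := by
  intro l
  induction l with
  | nil => intro a; exact le_refl a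
  | cons c rest ih =>
    intro a
    exact le_trans (le_max_left a (pvServed c jan)) (ih _)

theorem pvMax_mem_le (jan : List (Int × Int)) : ∀ (l : List (List Int × Int × List Int)) (a : Int),
    ∀ c ∈ l, pvServed c jan ≤ l.foldl (fun m c => max m (pvServed c jan)) a := by
  intro l
  induction l with
  | nil => intro a c hc; cases hc
  | cons d rest ih =>
    intro a c hc
    rw [List.mem_cons] at hc
    rw [List.foldl_cons]
    rcases hc with hc | hc
    · subst hc
      exact le_trans (le_max_right a _) (pvMax_init_le jan rest _)
    · exact ih _ c hc

-- core: pass 2 (an Option fold keyed by the fixed target M) recovers the greedy result,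
-- provided M bounds every served count in sight
theorem pvCore (jan : List (Int × Int)) (M : Int) : ∀ (l : List (List Int × Int × List Int)) (st : List Int × Int × List Int),
    (∀ c ∈ l, pvServed c jan ≤ M) → pvServed st jan ≤ M →
    l.foldl (pvPass2 M jan) (if pvServed st jan = M then some st else none)
    = (if pvServed (l.foldl (pvStepT jan) st) jan = M then some (l.foldl (pvStepT jan) st) else none) := by
  intro l
  induction l with
  | nil => intro st _ _; rfl
  | cons c rest ih =>
    intro st hl hst
    have hc : pvServed c jan ≤ M := hl c (by simp)
    have hstep : pvPass2 M jan (if pvServed st jan = M then some st else none) c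
        = (if pvServed (pvStepT jan st c) jan = M then some (pvStepT jan st c) else none) := by
      by_cases ha : pvServed st jan = M
      · by_cases hb : pvServed c jan = M ∧ c.2.1 < st.2.1
        · have h1 : ¬ pvServed c jan > pvServed st jan := by omega
          have h2 : pvServed c jan = pvServed st jan ∧ c.2.1 < st.2.1 := ⟨by omega, hb.2⟩
          simp only [pvPass2, pvStepT, if_pos ha, if_pos hb, if_neg h1, if_pos h2]
          rw [if_pos hb.1]
        · have h1 : ¬ pvServed c jan > pvServed st jan := by omega
          have h2 : ¬ (pvServed c jan = pvServed st jan ∧ c.2.1 < st.2.1) := fun h => hb ⟨by omega, h.2⟩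
          simp only [pvPass2, pvStepT, if_pos ha, if_neg h1, if_neg h2, if_neg hb]
      · by_cases hgt : pvServed c jan > pvServed st jan
        · simp only [pvPass2, pvStepT, if_neg ha, if_pos hgt]
        · have hcm : pvServed c jan ≠ M := by omega
          by_cases heq : pvServed c jan = pvServed st jan ∧ c.2.1 < st.2.1
          · simp only [pvPass2, pvStepT, if_neg ha, if_neg hgt, if_pos heq, if_neg hcm]
          · simp only [pvPass2, pvStepT, if_neg ha, if_neg hgt, if_neg heq, if_neg hcm]
    rw [List.foldl_cons, List.foldl_cons, hstep]
    refine ih (pvStepT jan st c) (fun d hd => hl d (by simp [hd])) ?_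
    unfold pvStepT
    split_ifs <;> [exact hc; exact hc; exact hst]

-- ===== VERDICT (by name: the statement is the Claim_ definition above) =====
theorem Melhoria_spec : Claim_equal_Melhoria := by
  intro sol ci cc jan dist at_ _ _
  unfold Spec_Melhoria Melhoria_alt
  rw [pvA_norm]
  simp only []
  rw [pvQfold_ext]
  set c0 : List Int × Int × List Int := (sol, ci, cc) with hc0
  set rest := pvRest sol dist at_ with hrest
  set alvo := rest.foldl (fun m c => max m (pvServed c jan)) (pvServed c0 jan) with halvo
  set g := rest.foldl (pvStepT jan) c0 with hg
  have hgM : pvServed g jan = alvo := by rw [hg, pvMaxlem]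
  have hfold : (c0 :: rest).foldl (pvPass2 alvo jan) none = some g := by
    rw [List.foldl_cons]
    have h0 : pvPass2 alvo jan none c0 = (if pvServed c0 jan = alvo then some c0 else none) := rfl
    rw [h0, pvCore jan alvo rest c0 (fun c hc => pvMax_mem_le jan rest _ c hc)
      (pvMax_init_le jan rest _), ← hg, hgM, if_pos rfl]
  rw [hfold]
  rfl
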